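-- pv_equiv track=rewrite | github.com/pblankley/itf_linking | linkitf/clustering.py | unique_clusters
-- ===== SOURCE A (Python) =====
-- from collections import Counter
--
-- def member_counts(k, sep='|', suff='_'):
--     """ This function counts the number of unique stems in a cluster by parsing
--     for the stems, and making a Counter() object based on the parsed stem data.
--     -------
--     Args: k; the cluster id (made up of tracklet ids joined with '|')
--           sep; str, the string to seperate by
--           suff_ the seperating suffix between the initial part linking related
--                 tracklets and the suffix distinguishing tracklets of the same
--                 object.
--     -------
--     Returns: Counter() object keyed on the stems of a cluster.
--     """
--     keys = k.split(sep)
--     stems = [key.split(suff)[0] for key in keys]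
--     stem_counter = Counter(stems)
--     return stem_counter
--
-- def unique_clusters(test_set):
--     """ This function defines the number of successes and failures in a cluster.
--     The definition had changed somewhat from this definition to the evalu() definition,
--     however, since this was originally used to tune the dt parameters, and is closely
--     related (though less granular) than what we use now, it is retained.
--     ---------
--     Args: test_set; list of k cluster_ids
--     --------
--     Returns: success_dict, failure_counter where the first is a dictionary keyed
--                 on file stem (the common value for truly related tracklets), with
--                 values as a tuple of the (number of tracklets, cluster_id), and the
--                 second is a Counter() keyed on cluster_id of the failures.
--     """
--     success_dict = {}
--     failure_counter = Counter()
--     for k in test_set: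
--         stem_counter = member_counts(k)
--         if len(stem_counter)>1:
--             failure_counter.update({k:1})
--         else:
--             for stem, v in stem_counter.items():
--                 if stem not in success_dict:
--                     success_dict[stem] = v, k
--                 elif v > success_dict[stem][0]:
--                     success_dict[stem] = v, k
--     return success_dict, failure_counter
-- ===== SOURCE B (Python) =====
-- def unique_clusters(test_set):
--     """Two-pass reformulation: first pass groups per-stem candidates and counts
--     failures; second pass reduces each stem's candidate list with a first-maximal
--     max (which matches the online running-max's first-wins tie behaviour)."""
--     candidates = {}          # stem -> list of (number of tracklets, cluster_id)
--     failure_counter = {}     # cluster_id -> count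
--     for k in test_set:
--         stems = [part.split('_')[0] for part in k.split('|')]
--         if len(set(stems)) > 1:
--             failure_counter[k] = failure_counter.get(k, 0) + 1
--         else:
--             # a '|'-split is never empty, so there is exactly one distinct stem
--             candidates.setdefault(stems[0], []).append((len(stems), k))
--     success_dict = {stem: max(cands, key=lambda t: t[0])
--                     for stem, cands in candidates.items()}
--     return success_dict, failure_counter
-- ===== Notes on version B (the rewrite author's own statement) =====
-- stated objective: faster
-- what changed: A classifies each cluster and maintains the per-stem running maximum online, building a Counter object per cluster id; B first groups all single-stem clusters into per-stem candidate lists using a cheap set()-of-stems test (and tallies failures in a plain dict) and then reduces each list in a second pass with max(key=first component), whose first-maximal result reproduces A's first-wins tie behaviour.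
import Mathlib
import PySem

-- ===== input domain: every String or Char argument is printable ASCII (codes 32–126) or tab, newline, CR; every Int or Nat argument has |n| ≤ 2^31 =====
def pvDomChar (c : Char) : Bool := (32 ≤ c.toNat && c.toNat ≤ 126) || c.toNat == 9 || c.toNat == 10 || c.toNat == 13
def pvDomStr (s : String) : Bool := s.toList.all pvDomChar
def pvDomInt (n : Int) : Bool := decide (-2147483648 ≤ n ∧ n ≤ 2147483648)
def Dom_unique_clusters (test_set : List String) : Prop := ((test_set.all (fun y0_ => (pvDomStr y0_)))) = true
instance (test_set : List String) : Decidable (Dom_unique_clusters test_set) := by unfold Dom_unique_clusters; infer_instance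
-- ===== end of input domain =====

-- B reorganises A's single online pass (classify + running per-stem maximum) into two passes:
-- group per-stem candidate tuples first, then reduce each list with a first-maximal max.

-- ===== PORT A =====
-- member_counts(k, sep='|', suff='_'): Counter over the stems of a cluster id.
-- sep and suff are nonempty at every call site, so split? never returns none, and
-- key.split(suff) is a nonempty list whose [0] is its head.
def member_counts (k sep suff : String) : PySem.Dict String Int :=
  let keys := (PySem.Str.split? k sep).getD []
  let stems := keys.map (fun key => ((PySem.Str.split? key suff).getD []).headD "")
  PySem.Dict.counter stems

-- loop body of A: st = (success_dict, failure_counter)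
def ucA_step (st : PySem.Dict String (Int × String) × PySem.Dict String Int) (k : String) :
    PySem.Dict String (Int × String) × PySem.Dict String Int :=
  let stem_counter := member_counts k "|" "_"
  if 1 < stem_counter.size then
    (st.1, st.2.modify k 0 (· + 1))   -- failure_counter.update({k: 1})
  else
    (stem_counter.items.foldl (fun sd p =>
        match sd.get? p.1 with        -- 'stem not in success_dict'
        | none => sd.insert p.1 (p.2, k)
        | some cur => if cur.1 < p.2 then sd.insert p.1 (p.2, k) else sd) st.1,
     st.2)

def unique_clusters (test_set : List String) : (List (String × Int × String)) × (List (String × Int)) :=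
  let st := test_set.foldl ucA_step (PySem.Dict.empty, PySem.Dict.empty)
  (st.1.items, st.2.items)

-- ===== PORT B =====
-- B-side helper: [part.split('_')[0] for part in k.split('|')] ('|'-split is nonempty, its [0] is its head)
def ucStems (k : String) : List String :=
  ((PySem.Str.split? k "|").getD []).map
    (fun part => ((PySem.Str.split? part "_").getD []).headD "")

-- first-pass loop body of B: st = (candidates, failure_counter)
def ucB_step (st : PySem.Dict String (List (Int × String)) × PySem.Dict String Int) (k : String) :
    PySem.Dict String (List (Int × String)) × PySem.Dict String Int :=
  let stems := ucStems k
  if 1 < (PySem.Set.ofList stems).length then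
    (st.1, st.2.insert k (st.2.getD k 0 + 1))
  else
    -- candidates.setdefault(stems[0], []).append((len(stems), k)); stems is never empty
    (st.1.modify (stems.headD "") [] (· ++ [((stems.length : Int), k)]), st.2)

def unique_clusters_alt (test_set : List String) : (List (String × Int × String)) × (List (String × Int)) :=
  let st := test_set.foldl ucB_step (PySem.Dict.empty, PySem.Dict.empty)
  -- max(cands, key=lambda t: t[0]): every candidate list is nonempty, so the default is never used
  (st.1.items.map (fun p => (p.1, PySem.List.maxD p.2 (fun t => t.1) ((0 : Int), ""))),
   st.2.items)

-- ===== PRECONDITION & SPEC =====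
def Spec_unique_clusters (test_set : List String) (out : (List (String × Int × String)) × (List (String × Int))) : Prop := out = unique_clusters_alt test_set
instance (test_set : List String) (out : (List (String × Int × String)) × (List (String × Int))) : Decidable (Spec_unique_clusters test_set out) := by unfold Spec_unique_clusters; infer_instance

-- ===== CLAIM (what is proved, stated in full; the proofs are below) =====
def Claim_equal_unique_clusters : Prop := ∀ (test_set : List String), Dom_unique_clusters test_set → Spec_unique_clusters test_set (unique_clusters test_set)

-- ===== LEMMAS AND PROOFS =====

-- B's per-stem candidate lists reduced pointwise to A's per-stem running maximum
def ucMapMax (l : List (String × List (Int × String))) : List (String × (Int × String)) :=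
  l.map (fun p => (p.1, PySem.List.maxD p.2 (fun t => t.1) ((0 : Int), "")))

lemma splitOn_go_length (sep : List Char) : ∀ (fuel : Nat) (l cur : List Char) (acc : List (List Char)),
    acc.length < (PySem.Chars.splitOn.go sep fuel l cur acc).length := by
  intro fuel
  induction fuel with
  | zero => intro l cur acc; simp [PySem.Chars.splitOn.go]
  | succ n ih =>
    intro l cur acc
    cases l with
    | nil => simp [PySem.Chars.splitOn.go]
    | cons c rest =>
      rw [PySem.Chars.splitOn.go]
      split
      · exact lt_trans (by simp) (ih _ _ _)
      · exact ih _ _ _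

lemma ucStems_ne_nil (k : String) : ucStems k ≠ [] := by
  unfold ucStems
  simp only [ne_eq, List.map_eq_nil_iff]
  simp only [PySem.Str.split?, PySem.Chars.split?]
  have h := splitOn_go_length "|".toList (k.toList.length + 1) k.toList [] []
  rw [if_neg (by decide)]
  simp only [Option.map_some, Option.getD_some, List.map_eq_nil_iff]
  intro hh
  rw [PySem.Chars.splitOn] at hh
  rw [hh] at h; simp at h

lemma mc_eq (k : String) : member_counts k "|" "_" = PySem.Dict.counter (ucStems k) := rfl

lemma ucSize_eq (k : String) :
    (member_counts k "|" "_").size = (PySem.Set.ofList (ucStems k)).length := by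
  rw [mc_eq]
  simp [PySem.Dict.size, PySem.Dict.items_counter]

lemma ucItems_singleton (k : String) (hne : ucStems k ≠ [])
    (h : ¬ 1 < (PySem.Set.ofList (ucStems k)).length) :
    (member_counts k "|" "_").items = [((ucStems k).headD "", ((ucStems k).length : Int))] := by
  rw [mc_eq, PySem.Dict.items_counter]
  set st := ucStems k with hst
  obtain ⟨a, t, hat⟩ : ∃ a t, st = a :: t := by
    rcases st with _ | ⟨a, t⟩
    · exact absurd rfl hne
    · exact ⟨a, t, rfl⟩
  have hmem : a ∈ PySem.Set.ofList st := (PySem.Set.mem_ofList st a).2 (by simp [hat])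
  obtain ⟨b, hb⟩ : ∃ b, PySem.Set.ofList st = [b] := by
    have hpos : 0 < (PySem.Set.ofList st).length := List.length_pos_of_mem hmem
    exact List.length_eq_one_iff.mp (by omega)
  have hall : ∀ c ∈ st, b = c := by
    intro c hc
    have : c ∈ PySem.Set.ofList st := (PySem.Set.mem_ofList st c).2 hc
    rw [hb] at this
    exact (List.mem_singleton.mp this).symm
  have hab : b = a := hall a (by simp [hat])
  have hcount : st.count b = st.length := List.count_eq_length.2 hall
  have hca : st.count a = st.length := hab ▸ hcount
  rw [hb, hab]
  simp [hca]
  rw [hat]; rfl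

lemma maxD_append_singleton (lst : List (Int × String)) (x : Int × String) :
    PySem.List.maxD (lst ++ [x]) (fun t => t.1) ((0 : Int), "") =
      match PySem.List.max? lst (fun t => t.1) with
      | none => x
      | some m => if m.1 < x.1 then x else m := by
  rw [PySem.List.maxD]
  have h : PySem.List.max? (lst ++ [x]) (fun t => t.1) =
      match PySem.List.max? lst (fun t => t.1) with
      | none => some x
      | some m => if m.1 < x.1 then some x else some m := by
    simp only [PySem.List.max?, List.foldl_append, List.foldl_cons, List.foldl_nil]
    split <;> simp_all
  rw [h]
  cases PySem.List.max? lst (fun t => t.1) with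
  | none => rfl
  | some m => by_cases hc : m.1 < x.1 <;> simp [hc]

lemma get?_mk_ucMapMax (l : List (String × List (Int × String))) (s : String) :
    (PySem.Dict.mk (ucMapMax l)).get? s =
      ((PySem.Dict.mk l).get? s).map (fun lst => PySem.List.maxD lst (fun t => t.1) ((0 : Int), "")) := by
  simp only [PySem.Dict.get?, ucMapMax, List.find?_map]
  rw [show ((fun p : String × (Int × String) => p.1 == s) ∘
      (fun p : String × List (Int × String) => (p.1, PySem.List.maxD p.2 (fun t => t.1) ((0:Int), ""))))
      = (fun p : String × List (Int × String) => p.1 == s) from rfl]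
  cases List.find? (fun p => p.1 == s) l <;> rfl

lemma contains_mk_ucMapMax (l : List (String × List (Int × String))) (s : String) :
    (PySem.Dict.mk (ucMapMax l)).contains s = (PySem.Dict.mk l).contains s := by
  simp [PySem.Dict.contains, ucMapMax, List.any_map, Function.comp_def]

lemma get?_eq_none_iff_contains {ν : Type} (d : PySem.Dict String ν) (s : String) :
    d.get? s = none ↔ d.contains s = false := by
  simp [PySem.Dict.get?, PySem.Dict.contains, List.find?_eq_none, List.any_eq_false]

lemma value_eq_of_get?_of_nodup {ν : Type} (d : PySem.Dict String ν) (hnd : d.keys.Nodup)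
    (s : String) (v : ν) (h : d.get? s = some v) :
    ∀ p ∈ d.items, p.1 = s → p.2 = v := by
  obtain ⟨q, hq, hqv⟩ : ∃ q, List.find? (fun p => p.1 == s) d.items = some q ∧ q.2 = v := by
    simp only [PySem.Dict.get?, Option.map_eq_some_iff] at h
    obtain ⟨q, hq1, hq2⟩ := h
    exact ⟨q, hq1, hq2⟩
  have hqmem := List.mem_of_find?_eq_some hq
  have hqs : q.1 = s := by simpa using List.find?_some hq
  intro p hp hps
  have : p.1 = q.1 := by rw [hps, hqs]
  have hpq : p = q :=
    List.inj_on_of_nodup_map (by simpa [PySem.Dict.keys] using hnd) hp hqmem this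
  rw [hpq, hqv]

lemma nodup_keys_insert {ν : Type} (d : PySem.Dict String ν) (hnd : d.keys.Nodup)
    (k : String) (v : ν) : (d.insert k v).keys.Nodup :=
  PySem.Dict.nodup_keys_foldl_insert [k] (fun _ _ => v) d hnd

lemma astep_commute (d : PySem.Dict String (List (Int × String))) (hnd : d.keys.Nodup)
    (s : String) (x : Int × String) (hx : 0 < x.1) :
    (match (PySem.Dict.mk (ucMapMax d.items)).get? s with
     | none => (PySem.Dict.mk (ucMapMax d.items)).insert s x
     | some cur => if cur.1 < x.1 then (PySem.Dict.mk (ucMapMax d.items)).insert s x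
                   else PySem.Dict.mk (ucMapMax d.items)) =
    PySem.Dict.mk (ucMapMax (d.modify s [] (· ++ [x])).items) := by
  rw [PySem.Dict.modify]
  cases h : d.get? s with
  | none =>
    have hc : d.contains s = false := (get?_eq_none_iff_contains d s).mp h
    have hc' : (PySem.Dict.mk (ucMapMax d.items)).contains s = false := by
      rw [contains_mk_ucMapMax]; exact hc
    rw [get?_mk_ucMapMax, h]
    simp only [Option.map_none]
    rw [PySem.Dict.insert, if_neg (by simp [hc']), PySem.Dict.insert, if_neg (by simp [hc])]
    have : d.getD s [] = [] := by simp [PySem.Dict.getD, h]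
    rw [this]
    simp only [ucMapMax, List.map_append, List.map_cons, List.map_nil, List.nil_append]
    rfl
  | some lst =>
    have hc : d.contains s = true := by
      by_contra hcc
      have : d.contains s = false := by simpa using hcc
      rw [(get?_eq_none_iff_contains d s).mpr this] at h; cases h
    have hc' : (PySem.Dict.mk (ucMapMax d.items)).contains s = true := by
      rw [contains_mk_ucMapMax]; exact hc
    have hgd : d.getD s [] = lst := by simp [PySem.Dict.getD, h]
    rw [get?_mk_ucMapMax, h]
    simp only [Option.map_some]
    rw [hgd]
    by_cases hcur : (PySem.List.maxD lst (fun t => t.1) ((0 : Int), "")).1 < x.1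
    · rw [if_pos hcur]
      simp only [PySem.Dict.insert, hc, hc', if_pos]
      have hmax : PySem.List.maxD (lst ++ [x]) (fun t => t.1) ((0 : Int), "") = x := by
        rw [maxD_append_singleton]
        cases hm : PySem.List.max? lst (fun t => t.1) with
        | none => rfl
        | some m =>
          have : m.1 < x.1 := by
            have : PySem.List.maxD lst (fun t => t.1) ((0 : Int), "") = m := by
              simp [PySem.List.maxD, hm]
            rwa [this] at hcur
          simp [this]
      simp only [ucMapMax, List.map_map]
      congr 1
      apply List.map_congr_left
      intro p _
      by_cases hps : p.1 == s
      · simp only [Function.comp_def, hps, if_pos, hmax]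
      · simp_all
    · rw [if_neg hcur]
      simp only [PySem.Dict.insert, hc, if_pos]
      have hmax : PySem.List.maxD (lst ++ [x]) (fun t => t.1) ((0 : Int), "") =
          PySem.List.maxD lst (fun t => t.1) ((0 : Int), "") := by
        rw [maxD_append_singleton]
        cases hm : PySem.List.max? lst (fun t => t.1) with
        | none =>
          exfalso
          have : PySem.List.maxD lst (fun t => t.1) ((0 : Int), "") = ((0 : Int), "") := by
            simp [PySem.List.maxD, hm]
          rw [this] at hcur
          exact hcur hx
        | some m =>
          have hme : PySem.List.maxD lst (fun t => t.1) ((0 : Int), "") = m := by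
            simp [PySem.List.maxD, hm]
          rw [hme] at hcur
          simp [hcur, hme]
      simp only [ucMapMax, List.map_map]
      apply congrArg
      symm
      apply List.map_congr_left
      intro p hp
      by_cases hps : p.1 == s
      · have hpv : p.2 = lst := value_eq_of_get?_of_nodup d hnd s lst h p hp (by simpa using hps)
        simp only [Function.comp_def, hps, if_pos, hmax, hpv]
        have : p.1 = s := by simpa using hps
        simp [this]
      · simp_all

lemma ucMain (l : List String) : ∀ (d : PySem.Dict String (List (Int × String)))
    (f : PySem.Dict String Int), d.keys.Nodup →
    l.foldl ucA_step (PySem.Dict.mk (ucMapMax d.items), f) =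
      (fun st => (PySem.Dict.mk (ucMapMax st.1.items), st.2))
        (l.foldl ucB_step (d, f)) := by
  induction l with
  | nil => intro d f _; rfl
  | cons k rest ih =>
    intro d f hnd
    simp only [List.foldl_cons]
    by_cases hcond : 1 < (PySem.Set.ofList (ucStems k)).length
    · have stepA : ucA_step (PySem.Dict.mk (ucMapMax d.items), f) k
          = (PySem.Dict.mk (ucMapMax d.items), f.modify k 0 (· + 1)) := by
        simp only [ucA_step, ucSize_eq k, if_pos hcond]
      have stepB : ucB_step (d, f) k = (d, f.insert k (f.getD k 0 + 1)) := by
        simp only [ucB_step, if_pos hcond]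
      rw [stepA, stepB]
      have : f.modify k 0 (· + 1) = f.insert k (f.getD k 0 + 1) := rfl
      rw [this]
      exact ih d _ hnd
    · have hne := ucStems_ne_nil k
      have hpos : (0 : Int) < ((ucStems k).length : Int) := by
        have : 0 < (ucStems k).length := List.length_pos_iff.mpr hne
        exact_mod_cast this
      have stepA : ucA_step (PySem.Dict.mk (ucMapMax d.items), f) k
          = (PySem.Dict.mk (ucMapMax
              ((d.modify ((ucStems k).headD "") [] (· ++ [(((ucStems k).length : Int), k)])).items)), f) := by
        simp only [ucA_step, ucSize_eq k, if_neg hcond, ucItems_singleton k hne hcond,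
          List.foldl_cons, List.foldl_nil]
        exact Prod.ext (astep_commute d hnd ((ucStems k).headD "")
          (((ucStems k).length : Int), k) hpos) rfl
      have stepB : ucB_step (d, f)  k
          = (d.modify ((ucStems k).headD "") [] (· ++ [(((ucStems k).length : Int), k)]), f) := by
        simp only [ucB_step, if_neg hcond]
      rw [stepA, stepB]
      exact ih _ f (nodup_keys_insert d hnd _ _)

-- ===== VERDICT (by name: the statement is the Claim_ definition above) =====
theorem unique_clusters_spec : Claim_equal_unique_clusters := by
  intro ts _
  unfold Spec_unique_clusters unique_clusters unique_clusters_alt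
  have h := ucMain ts PySem.Dict.empty PySem.Dict.empty (by simp [PySem.Dict.empty, PySem.Dict.keys])
  rw [show (PySem.Dict.mk (ucMapMax (PySem.Dict.empty).items)) = (PySem.Dict.empty : PySem.Dict String (Int × String)) from rfl] at h
  rw [h]
  rfl
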